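-- pv_equiv track=rewrite | github.com/esgv-junk/pyforge | iter_utils.py | group_k_forward
-- ===== SOURCE A (Python) =====
-- import itertools
-- import collections
--
-- def eat(seq, n=None):
--     if n is None:
--         collections.deque(seq, maxlen=0)
--     else:
--         next(itertools.islice(seq, n, n), None)
--
-- def group_k_forward(seq, lookahead=1, end_padding=None):
--     safe_seq = seq
--     if end_padding is not None:
--         safe_seq = itertools.chain(
--             seq,
--             itertools.repeat(end_padding, lookahead)
--         )
--     context = itertools.tee(safe_seq, lookahead + 1)
--     [eat(context[i], i) for i in range(lookahead + 1)]
--     return zip(*context)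
-- ===== SOURCE B (Python) =====
-- def group_k_forward(seq, lookahead=1, end_padding=None):
--     s = list(seq)
--     if end_padding is not None:
--         s.extend([end_padding] * lookahead)
--     k = lookahead + 1
--     return [tuple(s[i:i + k]) for i in range(len(s) - k + 1)]
-- ===== Notes on version B (the rewrite author's own statement) =====
-- stated objective: simpler
-- what changed: Replaces the tee/eat/zip staggered-cursor machinery with a single padded list and a direct slice comprehension; Pre_ restricts to the natural domain lookahead >= 0 (A raises for lookahead <= -2; -1 is a degenerate corner where A yields no groups and B yields empty groups).
-- outside the precondition, e.g. on group_k_forward([1, 2], -1, None): A returns [], B returns [(), (), ()]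
import Mathlib
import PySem

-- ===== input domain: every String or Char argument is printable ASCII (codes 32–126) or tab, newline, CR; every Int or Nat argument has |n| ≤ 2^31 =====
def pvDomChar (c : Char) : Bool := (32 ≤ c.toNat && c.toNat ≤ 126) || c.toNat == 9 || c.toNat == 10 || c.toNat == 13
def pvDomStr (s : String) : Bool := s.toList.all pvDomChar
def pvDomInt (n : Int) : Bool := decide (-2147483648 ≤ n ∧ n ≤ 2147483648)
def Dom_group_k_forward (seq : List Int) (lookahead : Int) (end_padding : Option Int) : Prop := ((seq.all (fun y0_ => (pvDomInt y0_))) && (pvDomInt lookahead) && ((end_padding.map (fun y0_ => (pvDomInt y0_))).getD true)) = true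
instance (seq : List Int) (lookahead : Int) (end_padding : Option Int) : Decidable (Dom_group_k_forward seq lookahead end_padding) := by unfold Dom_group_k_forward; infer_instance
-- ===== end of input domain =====

-- B replaces A's tee/eat/zip staggered cursors with one padded list and a direct slice comprehension (simpler, same cost).

-- ===== PORT A =====
-- zip(*context): take one head from each cursor while every cursor is nonempty
def pvZipManyAux : List Int → List (List Int) → List (List Int)
  | [], _ => []
  | x :: xs, rest =>
    if rest.all (fun l => !l.isEmpty) then
      (x :: rest.map (fun l => l.headD 0)) :: pvZipManyAux xs (rest.map List.tail)
    else []

def group_k_forward (seq : List Int) (lookahead : Int) (end_padding : Option Int) : List (List Int) :=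
  -- safe_seq = chain(seq, repeat(end_padding, lookahead)) when padding is given
  let safe := match end_padding with
    | none => seq
    | some p => seq ++ List.replicate lookahead.toNat p
  -- context = tee(safe, lookahead+1) with cursor i advanced by i via eat
  let context := (List.range (lookahead + 1).toNat).map (fun i => safe.drop i)
  match context with
  | [] => []
  | c :: cs => pvZipManyAux c cs

-- ===== PORT B =====
def group_k_forward_alt (seq : List Int) (lookahead : Int) (end_padding : Option Int) : List (List Int) :=
  let s := match end_padding with
    | none => seq
    | some p => seq ++ List.replicate lookahead.toNat p
  let k := lookahead + 1
  (PySem.List.pyRange 0 ((s.length : Int) - k + 1) 1).map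
    (fun i => PySem.List.slice s (some i) (some (i + k)))

-- ===== PRECONDITION & SPEC =====
-- Pre_ restricts to the natural domain of a lookahead count: for negative lookahead A raises
-- ValueError (except at -1, an unspecified degenerate corner where A yields no groups and B yields empty groups).
def Pre_group_k_forward (seq : List Int) (lookahead : Int) (end_padding : Option Int) : Prop :=
  0 ≤ lookahead
instance (seq : List Int) (lookahead : Int) (end_padding : Option Int) : Decidable (Pre_group_k_forward seq lookahead end_padding) := by unfold Pre_group_k_forward; infer_instance
def pvWitness_group_k_forward : List Int × Int × Option Int := ([1, 2, 3, 4], 2, some 9)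

def Spec_group_k_forward (seq : List Int) (lookahead : Int) (end_padding : Option Int) (out : List (List Int)) : Prop := out = group_k_forward_alt seq lookahead end_padding
instance (seq : List Int) (lookahead : Int) (end_padding : Option Int) (out : List (List Int)) : Decidable (Spec_group_k_forward seq lookahead end_padding out) := by unfold Spec_group_k_forward; infer_instance

-- ===== CLAIM (what is proved, stated in full; the proofs are below) =====
def Claim_equal_group_k_forward : Prop := ∀ (seq : List Int) (lookahead : Int) (end_padding : Option Int), Dom_group_k_forward seq lookahead end_padding → Pre_group_k_forward seq lookahead end_padding → Spec_group_k_forward seq lookahead end_padding (group_k_forward seq lookahead end_padding)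

-- ===== LEMMAS AND PROOFS =====

-- heads of the staggered cursors are a prefix of the list
lemma pv_heads_eq_take (xs : List Int) : ∀ (m : Nat), m ≤ xs.length →
    (List.range m).map (fun i => (xs.drop i).headD 0) = xs.take m := by
  intro m
  induction m with
  | zero => intro _; simp
  | succ m ih =>
    intro hm
    rw [List.range_succ, List.map_append, ih (by omega), List.take_add_one]
    simp only [List.map_cons, List.map_nil]
    have hlt : m < xs.length := by omega
    have : (xs.drop m).headD 0 = xs[m] := by
      rw [List.headD_eq_head?, List.head?_drop]
      simp [List.getElem?_eq_getElem hlt]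
    simp [this, List.getElem?_eq_getElem hlt]

-- core: zipping cursors s, s.drop 1, …, s.drop m equals the list of (m+1)-windows of s
lemma pv_zip_windows (m : Nat) : ∀ (s : List Int),
    pvZipManyAux s ((List.range m).map (fun i => s.drop (i + 1)))
      = (List.range (s.length - m)).map (fun i => (s.drop i).take (m + 1)) := by
  intro s
  induction s with
  | nil => simp [pvZipManyAux]
  | cons x xs ih =>
    have hrest : (List.range m).map (fun i => (x :: xs).drop (i + 1))
        = (List.range m).map (fun i => xs.drop i) := by
      simp
    rw [hrest]
    by_cases hm : m ≤ xs.length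
    · have hcond : ((List.range m).map (fun i => xs.drop i)).all (fun l => !l.isEmpty) = true := by
        simp only [List.all_eq_true, List.mem_map, List.mem_range]
        rintro l ⟨i, hi, rfl⟩
        simp [List.drop_eq_nil_iff]
        omega
      have htails : ((List.range m).map (fun i => xs.drop i)).map List.tail
          = (List.range m).map (fun i => xs.drop (i + 1)) := by
        rw [List.map_map]
        exact List.map_congr_left (fun i _ => by simp [List.tail_drop])
      simp only [pvZipManyAux, hcond, if_pos]
      rw [htails, ih]
      have hlen : (x :: xs).length - m = (xs.length - m) + 1 := by
        simp only [List.length_cons]; omega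
      rw [hlen, List.range_succ_eq_map]
      simp only [List.map_cons, List.map_map]
      congr 1
      · -- first window
        have hc : (List.range m).map ((fun l => l.headD 0) ∘ fun i => xs.drop i)
            = (List.range m).map (fun i => (xs.drop i).headD 0) :=
          List.map_congr_left (fun i _ => rfl)
        rw [hc, pv_heads_eq_take xs m hm]
        simp
    · have hcond : ((List.range m).map (fun i => xs.drop i)).all (fun l => !l.isEmpty) = false := by
        rw [Bool.eq_false_iff]
        intro hall
        rw [List.all_eq_true] at hall
        have := hall (xs.drop xs.length) (List.mem_map.mpr ⟨xs.length, List.mem_range.mpr (by omega), rfl⟩)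
        simp at this
      simp [pvZipManyAux, hcond]
      omega

-- both ports agree on the common padded list s, for lookahead = m ≥ 0
lemma pv_main (s : List Int) (m : Nat) :
    (match (List.range (((m : Int)) + 1).toNat).map (fun i => s.drop i) with
      | [] => ([] : List (List Int))
      | c :: cs => pvZipManyAux c cs)
    = (PySem.List.pyRange 0 ((s.length : Int) - ((m : Int) + 1) + 1) 1).map
        (fun i => PySem.List.slice s (some i) (some (i + ((m : Int) + 1)))) := by
  rw [show (((m : Int)) + 1).toNat = m + 1 from by omega, List.range_succ_eq_map]
  simp only [List.map_cons, List.drop_zero, List.map_map]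
  have hctx : (List.range m).map ((fun i => s.drop i) ∘ Nat.succ)
      = (List.range m).map (fun i => s.drop (i + 1)) :=
    List.map_congr_left (fun i _ => rfl)
  rw [hctx, pv_zip_windows m s]
  rw [show ((s.length : Int) - ((m : Int) + 1) + 1) = ((s.length : Int) - (m : Int)) from by ring]
  have hrange : PySem.List.pyRange 0 ((s.length : Int) - (m : Int)) 1
      = (List.range (s.length - m)).map (fun k : Nat => (k : Int)) := by
    rw [PySem.List.pyRange_one]
    rw [show (((s.length : Int) - (m : Int)) - 0).toNat = s.length - m from by omega]
    exact List.map_congr_left (fun k _ => by omega)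
  rw [hrange, List.map_map]
  refine List.map_congr_left (fun i _ => ?_)
  simp only [Function.comp]
  rw [show (i : Int) + ((m : Int) + 1) = (i : Int) + ((m + 1 : Nat) : Int) from by push_cast; ring,
    PySem.List.slice_natCast_add]

-- ===== VERDICT (by name: the statement is the Claim_ definition above) =====
theorem group_k_forward_spec : Claim_equal_group_k_forward := by
  intro seq lookahead end_padding _hdom hpre
  have h0 : (0 : Int) ≤ lookahead := hpre
  obtain ⟨m, rfl⟩ : ∃ m : Nat, lookahead = (m : Int) := ⟨lookahead.toNat, by omega⟩
  unfold Spec_group_k_forward group_k_forward group_k_forward_alt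
  cases end_padding with
  | none => exact pv_main seq m
  | some p => exact pv_main (seq ++ List.replicate ((m : Int)).toNat p) m
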